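-- pv_equiv track=rewrite | github.com/Shehreyar-Ali-A/ai-usage-analyzer | backend/app/services/chunking/chat_chunker.py | _merge_small
-- ===== SOURCE A (Python) =====
-- from typing import List
--
-- def _word_count(text: str) -> int:
--     return len(text.split())
--
-- def _merge_small(paragraphs: List[str], min_words: int) -> List[str]:
--     if not paragraphs:
--         return []
--     merged: List[str] = []
--     buffer: List[str] = []
--     buf_words = 0
--
--     for para in paragraphs:
--         pw = _word_count(para)
--         if buf_words + pw < min_words:
--             buffer.append(para)
--             buf_words += pw
--         else:
--             if buffer:
--                 buffer.append(para)
--                 merged.append("\n\n".join(buffer))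
--                 buffer = []
--                 buf_words = 0
--             else:
--                 merged.append(para)
--
--     if buffer:
--         if merged:
--             merged[-1] = merged[-1] + "\n\n" + "\n\n".join(buffer)
--         else:
--             merged.append("\n\n".join(buffer))
--     return merged
-- ===== SOURCE B (Python) =====
-- from typing import List
--
-- def _merge_small(paragraphs: List[str], min_words: int) -> List[str]:
--     # Different decomposition: repeatedly peel off the shortest prefix whose
--     # word total reaches min_words, join it as one chunk; a short trailing
--     # remainder is folded into the last chunk (or stands alone).
--     groups: List[str] = []
--     rest = paragraphs
--     while rest:
--         total = 0
--         k = 0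
--         while k < len(rest):
--             total += len(rest[k].split())
--             k += 1
--             if total >= min_words:
--                 break
--         if total >= min_words:
--             groups.append("\n\n".join(rest[:k]))
--             rest = rest[k:]
--         else:
--             tail = "\n\n".join(rest)
--             if groups:
--                 groups[-1] = groups[-1] + "\n\n" + tail
--             else:
--                 groups.append(tail)
--             rest = []
--     return groups
-- ===== Notes on version B (the rewrite author's own statement) =====
-- stated objective: alternative
-- what changed: Replaces the single fold over a (merged, buffer, buf_words) accumulator with an outer loop that repeatedly peels off the shortest prefix of the remaining paragraphs whose word total reaches min_words and joins it as one chunk, folding a short trailing remainder into the last chunk.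
import Mathlib
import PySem

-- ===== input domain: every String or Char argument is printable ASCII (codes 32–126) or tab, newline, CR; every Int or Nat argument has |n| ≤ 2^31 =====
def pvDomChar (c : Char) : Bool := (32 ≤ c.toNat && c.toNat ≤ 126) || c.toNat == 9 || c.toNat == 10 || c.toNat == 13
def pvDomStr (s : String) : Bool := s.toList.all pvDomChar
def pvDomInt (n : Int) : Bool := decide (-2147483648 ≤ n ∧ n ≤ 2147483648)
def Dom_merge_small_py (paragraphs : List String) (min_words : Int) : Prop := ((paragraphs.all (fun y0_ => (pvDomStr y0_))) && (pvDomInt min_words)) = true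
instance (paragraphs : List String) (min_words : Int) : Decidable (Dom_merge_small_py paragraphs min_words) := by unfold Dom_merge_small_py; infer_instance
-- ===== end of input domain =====

-- B re-implements A by repeatedly peeling off the shortest prefix reaching min_words words
-- (an 'alternative' decomposition, same cost); equivalence of return values is proved below.

-- ===== PORT A =====
-- word count: len(text.split())
def pvWC (s : String) : Int := ((PySem.Str.split₀ s).length : Int)

def pvJoin (xs : List String) : String := PySem.Str.join "\n\n" xs

-- one iteration of A's for-loop over state (merged, buffer, buf_words)
def pvStepA (min_words : Int) (st : List String × List String × Int) (para : String) :
    List String × List String × Int :=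
  let (merged, buffer, bw) := st
  let pw := pvWC para
  if bw + pw < min_words then (merged, buffer ++ [para], bw + pw)
  else if buffer ≠ [] then (merged ++ [pvJoin (buffer ++ [para])], [], 0)
  else (merged ++ [para], [], 0)

def merge_small_py (paragraphs : List String) (min_words : Int) : List String :=
  if paragraphs = [] then []
  else
    let st := paragraphs.foldl (pvStepA min_words) ([], [], 0)
    let merged := st.1
    let buffer := st.2.1
    if buffer ≠ [] then
      if merged ≠ [] then
        merged.dropLast ++ [merged.getLast! ++ "\n\n" ++ pvJoin buffer]
      else [pvJoin buffer]
    else merged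

-- ===== PORT B =====
-- inner while loop of B: scan forward accumulating word counts, stop once the
-- running total reaches min_words; returns (prefix scanned, remainder, reached?)
def pvTakeGroup (min_words : Int) : List String → Int → List String × List String × Bool
  | [], _ => ([], [], false)
  | p :: rest, total =>
    let t := total + pvWC p
    if min_words ≤ t then ([p], rest, true)
    else
      let (g, r, b) := pvTakeGroup min_words rest t
      (p :: g, r, b)

theorem pvTakeGroup_append (min_words : Int) :
    ∀ (l : List String) (t : Int), (pvTakeGroup min_words l t).1 ++ (pvTakeGroup min_words l t).2.1 = l := by
  intro l
  induction l with
  | nil => intro t; simp [pvTakeGroup]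
  | cons p rest ih =>
    intro t
    simp only [pvTakeGroup]
    split
    · simp
    · have := ih (t + pvWC p)
      simp_all

theorem pvTakeGroup_true_ne (min_words : Int) :
    ∀ (l : List String) (t : Int), (pvTakeGroup min_words l t).2.2 = true → (pvTakeGroup min_words l t).1 ≠ [] := by
  intro l
  induction l with
  | nil => intro t h; simp [pvTakeGroup] at h
  | cons p rest ih =>
    intro t h
    simp only [pvTakeGroup] at *
    by_cases hc : min_words ≤ t + pvWC p
    · simp [hc]
    · simp [hc] at h ⊢

theorem pvTakeGroup_true_len (min_words : Int) (l : List String) (t : Int)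
    (h : (pvTakeGroup min_words l t).2.2 = true) :
    (pvTakeGroup min_words l t).2.1.length < l.length := by
  have h1 := pvTakeGroup_append min_words l t
  have h2 := pvTakeGroup_true_ne min_words l t h
  have : (pvTakeGroup min_words l t).1.length + (pvTakeGroup min_words l t).2.1.length = l.length := by
    have := congrArg List.length h1; simpa using this
  cases hg : (pvTakeGroup min_words l t).1 with
  | nil => exact absurd hg h2
  | cons a as => rw [hg] at this; simp at this; omega

-- outer while loop of B over (rest, groups)
def pvLoopB (min_words : Int) (rest groups : List String) : List String :=
  match rest with
  | [] => groups
  | p :: tl =>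
    match h : pvTakeGroup min_words (p :: tl) 0 with
    | (g, r, true) => pvLoopB min_words r (groups ++ [pvJoin g])
    | (_, _, false) =>
      if groups = [] then [pvJoin (p :: tl)]
      else groups.dropLast ++ [groups.getLast! ++ "\n\n" ++ pvJoin (p :: tl)]
termination_by rest.length
decreasing_by
  have := pvTakeGroup_true_len min_words (p :: tl) 0 (by rw [h])
  rw [h] at this
  simpa using this

def merge_small_py_alt (paragraphs : List String) (min_words : Int) : List String :=
  pvLoopB min_words paragraphs []

-- ===== PRECONDITION & SPEC =====
def Spec_merge_small_py (paragraphs : List String) (min_words : Int) (out : List String) : Prop := out = merge_small_py_alt paragraphs min_words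
instance (paragraphs : List String) (min_words : Int) (out : List String) : Decidable (Spec_merge_small_py paragraphs min_words out) := by unfold Spec_merge_small_py; infer_instance

-- ===== CLAIM (what is proved, stated in full; the proofs are below) =====
def Claim_equal_merge_small_py : Prop := ∀ (paragraphs : List String) (min_words : Int), Dom_merge_small_py paragraphs min_words → Spec_merge_small_py paragraphs min_words (merge_small_py paragraphs min_words)

-- ===== LEMMAS AND PROOFS =====

-- running A's loop over the prefix that pvTakeGroup closes empties the buffer into one joined chunk
theorem foldA_of_takeGroup_true (min_words : Int) :
    ∀ (l : List String) (total : Int) (buf m : List String),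
      (pvTakeGroup min_words l total).2.2 = true →
      (pvTakeGroup min_words l total).1.foldl (pvStepA min_words) (m, buf, total) =
        (m ++ [pvJoin (buf ++ (pvTakeGroup min_words l total).1)], [], 0) := by
  intro l
  induction l with
  | nil => intro total buf m h; simp [pvTakeGroup] at h
  | cons p rest ih =>
    intro total buf m h
    simp only [pvTakeGroup] at *
    by_cases hc : min_words ≤ total + pvWC p
    · simp only [if_pos hc] at *
      simp only [List.foldl, pvStepA]
      rw [if_neg (by omega)]
      by_cases hb : buf = []
      · subst hb
        simp [pvJoin, PySem.Str.join]
      · simp [hb]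
    · simp only [if_neg hc] at *
      have hstep : pvStepA min_words (m, buf, total) p = (m, buf ++ [p], total + pvWC p) := by
        simp only [pvStepA]; rw [if_pos (by omega)]
      rw [List.foldl_cons, hstep]
      have := ih (total + pvWC p) (buf ++ [p]) m h
      simpa using this

-- if pvTakeGroup never reaches min_words, A's loop just accumulates into the buffer
theorem foldA_of_takeGroup_false (min_words : Int) :
    ∀ (l : List String) (total : Int) (buf m : List String),
      (pvTakeGroup min_words l total).2.2 = false →
      ∃ t', l.foldl (pvStepA min_words) (m, buf, total) = (m, buf ++ l, t') := by
  intro l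
  induction l with
  | nil => intro total buf m _; exact ⟨total, by simp⟩
  | cons p rest ih =>
    intro total buf m h
    simp only [pvTakeGroup] at h
    by_cases hc : min_words ≤ total + pvWC p
    · simp [if_pos hc] at h
    · simp only [if_neg hc] at h
      have hstep : pvStepA min_words (m, buf, total) p = (m, buf ++ [p], total + pvWC p) := by
        simp only [pvStepA]; rw [if_pos (by omega)]
      obtain ⟨t', ht'⟩ := ih (total + pvWC p) (buf ++ [p]) m (by simpa using h)
      exact ⟨t', by simp [List.foldl, hstep, ht']⟩

-- A's finishing step (tail handling) applied to a loop end state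
def pvFinishA (st : List String × List String × Int) : List String :=
  if st.2.1 ≠ [] then
    if st.1 ≠ [] then st.1.dropLast ++ [st.1.getLast! ++ "\n\n" ++ pvJoin st.2.1]
    else [pvJoin st.2.1]
  else st.1

theorem finishA_foldA_eq_loopB (min_words : Int) :
    ∀ (n : Nat) (rest : List String) (m : List String), rest.length ≤ n →
      pvFinishA (rest.foldl (pvStepA min_words) (m, [], 0)) = pvLoopB min_words rest m := by
  intro n
  induction n with
  | zero =>
    intro rest m hn
    have : rest = [] := by cases rest <;> simp_all
    subst this; simp [pvFinishA, pvLoopB]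
  | succ n ih =>
    intro rest m hn
    match rest with
    | [] => simp [pvFinishA, pvLoopB]
    | p :: tl =>
      rw [pvLoopB]
      match h : pvTakeGroup min_words (p :: tl) 0 with
      | (g, r, true) =>
        have happ := pvTakeGroup_append min_words (p :: tl) 0
        rw [h] at happ
        have hfold := foldA_of_takeGroup_true min_words (p :: tl) 0 [] m (by rw [h])
        rw [h] at hfold; simp only at hfold
        have hsplit : (p :: tl).foldl (pvStepA min_words) (m, ([] : List String), 0) =
            r.foldl (pvStepA min_words) (g.foldl (pvStepA min_words) (m, [], 0)) := by
          rw [← List.foldl_append, happ]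
        have hlen := pvTakeGroup_true_len min_words (p :: tl) 0 (by rw [h])
        rw [h] at hlen; simp only at hlen
        rw [hsplit, hfold]
        exact ih r (m ++ [pvJoin g]) (by simp only [List.length_cons] at hlen hn; omega)
      | (g, r, false) =>
        obtain ⟨t', ht'⟩ := foldA_of_takeGroup_false min_words (p :: tl) 0 [] m (by rw [h])
        rw [ht']
        simp [pvFinishA]

theorem merge_small_eq_finish (paragraphs : List String) (min_words : Int) :
    merge_small_py paragraphs min_words =
      pvFinishA (paragraphs.foldl (pvStepA min_words) ([], [], 0)) := by
  by_cases hp : paragraphs = []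
  · subst hp; simp [merge_small_py, pvFinishA]
  · simp only [merge_small_py, if_neg hp, pvFinishA]

-- ===== VERDICT (by name: the statement is the Claim_ definition above) =====
theorem merge_small_py_spec : Claim_equal_merge_small_py := by
  intro paragraphs min_words _
  unfold Spec_merge_small_py merge_small_py_alt
  rw [merge_small_eq_finish]
  exact finishA_foldA_eq_loopB min_words paragraphs.length paragraphs [] le_rfl
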